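-- pv_equiv track=rewrite | github.com/omarayyman07/PracticeAssignmentsGUC | Quiz 1.py | omar
-- ===== SOURCE A (Python) =====
-- def big(x,y):
--     if x>y:
--         return x
--     else:
--         return y
--
-- def omar(x,y):
--     total=0
--     i=0
--     while x>0 and y>0:
--         temp1=x%10
--         temp2=y%10
--         total+=big(temp1,temp2)*(10**i)
--         x//=10
--         y//=10
--         i+=1
--     return total
-- ===== SOURCE B (Python) =====
-- def omar(x, y):
--     if x <= 0 or y <= 0:
--         return 0
--     return max(x % 10, y % 10) + 10 * omar(x // 10, y // 10)
-- ===== Notes on version B (the rewrite author's own statement) =====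
-- stated objective: simpler
-- what changed: Replaced the while-loop that accumulates max-digits weighted by 10**i into a running total with a direct structural recursion that builds the number back-to-front as max-digit + 10*recursion, eliminating the counter i, the power computation and the accumulator.
import Mathlib
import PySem

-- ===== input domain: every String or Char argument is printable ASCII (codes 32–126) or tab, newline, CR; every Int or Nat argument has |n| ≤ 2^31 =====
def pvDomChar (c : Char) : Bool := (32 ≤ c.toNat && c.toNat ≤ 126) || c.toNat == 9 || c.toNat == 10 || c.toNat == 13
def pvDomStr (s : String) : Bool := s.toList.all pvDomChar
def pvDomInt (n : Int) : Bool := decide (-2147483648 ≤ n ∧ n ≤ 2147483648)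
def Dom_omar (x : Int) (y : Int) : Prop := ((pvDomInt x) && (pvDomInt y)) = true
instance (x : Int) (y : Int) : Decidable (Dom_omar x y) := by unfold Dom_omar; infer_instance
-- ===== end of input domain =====

-- B replaces A's while-loop with counter i and 10**i accumulator by a direct
-- structural recursion (max-digit + 10 * recursion): simpler, same cost.


-- ===== PORT A =====
-- helper 'big' of A, literally
def big (x : Int) (y : Int) : Int := if x > y then x else y

theorem pvFloordiv10_lt (x : Int) (h : 0 < x) :
    (PySem.Int.floordiv x 10).toNat < x.toNat := by
  rw [PySem.Int.floordiv_eq_ediv_of_pos (by omega)]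
  omega

-- the while loop of A, state (total, i, x, y)
def omarLoop (x : Int) (y : Int) (total : Int) (i : Nat) : Int :=
  if h : x > 0 ∧ y > 0 then
    omarLoop (PySem.Int.floordiv x 10) (PySem.Int.floordiv y 10)
      (total + big (PySem.Int.mod x 10) (PySem.Int.mod y 10) * (10 ^ i)) (i + 1)
  else total
termination_by x.toNat
decreasing_by exact pvFloordiv10_lt x h.1

def omar (x : Int) (y : Int) : Int := omarLoop x y 0 0

-- ===== PORT B =====
def omar_alt (x : Int) (y : Int) : Int :=
  if h : x ≤ 0 ∨ y ≤ 0 then 0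
  else
    max (PySem.Int.mod x 10) (PySem.Int.mod y 10) +
      10 * omar_alt (PySem.Int.floordiv x 10) (PySem.Int.floordiv y 10)
termination_by x.toNat
decreasing_by exact pvFloordiv10_lt x (by omega)

-- ===== PRECONDITION & SPEC =====
def Spec_omar (x : Int) (y : Int) (out : Int) : Prop := out = omar_alt x y
instance (x : Int) (y : Int) (out : Int) : Decidable (Spec_omar x y out) := by unfold Spec_omar; infer_instance

-- ===== CLAIM (what is proved, stated in full; the proofs are below) =====
def Claim_equal_omar : Prop := ∀ (x : Int) (y : Int), Dom_omar x y → Spec_omar x y (omar x y)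

-- ===== LEMMAS AND PROOFS =====

-- loop invariant: the accumulator form equals total + 10^i times B's recursion
theorem omarLoop_eq (n : Nat) :
    ∀ (x y total : Int) (i : Nat), x.toNat ≤ n →
      omarLoop x y total i = total + (10 : Int) ^ i * omar_alt x y := by
  induction n with
  | zero =>
    intro x y total i hx
    rw [omarLoop, omar_alt]
    have hx0 : x ≤ 0 := by omega
    rw [dif_neg (by omega), dif_pos (Or.inl hx0)]
    ring
  | succ n ih =>
    intro x y total i hx
    rw [omarLoop, omar_alt]
    by_cases h : x > 0 ∧ y > 0
    · rw [dif_pos h, dif_neg (by omega)]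
      have hlt := pvFloordiv10_lt x h.1
      rw [ih _ _ _ _ (by omega)]
      have hbig : big (PySem.Int.mod x 10) (PySem.Int.mod y 10)
          = max (PySem.Int.mod x 10) (PySem.Int.mod y 10) := by
        unfold big
        rcases le_or_gt (PySem.Int.mod x 10) (PySem.Int.mod y 10) with hle | hgt
        · rw [if_neg (by omega), max_eq_right hle]
        · rw [if_pos hgt, max_eq_left (by omega)]
      rw [hbig]
      ring
    · rw [dif_neg h, dif_pos (by omega)]
      ring

-- ===== VERDICT (by name: the statement is the Claim_ definition above) =====
theorem omar_spec : Claim_equal_omar := by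
  intro x y _
  unfold Spec_omar omar
  rw [omarLoop_eq x.toNat x y 0 0 le_rfl]
  ring
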